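-- pv_equiv track=rewrite | github.com/xingweiqu/LongWriter | baseline_inference/extrat_table_and_ref.py | extract_citations_from_bbl
-- ===== SOURCE A (Python) =====
-- def extract_citations_from_bbl(content):
--     """
--     从 .bbl 文件内容中提取参考文献条目
--     """
--     citations = []
--     if content:
--         lines = content.splitlines()
--         in_citation = False
--         citation = []
--
--         for line in lines:
--             if "\\bibitem" in line:  # 检测参考文献条目开始
--                 if citation:  # 保存之前的参考文献条目
--                     citations.append("\n".join(citation))
--                     citation = []
--                 in_citation = True
--             if in_citation:
--                 citation.append(line)
--
--         if citation:  # 保存最后一个参考文献条目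
--             citations.append("\n".join(citation))
--     return citations
-- ===== SOURCE B (Python) =====
-- def extract_citations_from_bbl(content):
--     """
--     从 .bbl 文件内容中提取参考文献条目
--     """
--     if not content:
--         return []
--     lines = content.splitlines()
--     n = len(lines)
--     # skip the preamble before the first \bibitem line
--     i = 0
--     while i < n and "\\bibitem" not in lines[i]:
--         i += 1
--     citations = []
--     while i < n:
--         j = i + 1
--         while j < n and "\\bibitem" not in lines[j]:
--             j += 1
--         citations.append("\n".join(lines[i:j]))
--         i = j
--     return citations
-- ===== Notes on version B (the rewrite author's own statement) =====
-- stated objective: simpler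
-- what changed: Replaces A's single pass with an in_citation flag and a pending-lines accumulator by a two-phase index scan: skip the preamble to the first \bibitem line, then repeatedly scan to the next \bibitem line and slice-and-join each block directly.
import Mathlib
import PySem

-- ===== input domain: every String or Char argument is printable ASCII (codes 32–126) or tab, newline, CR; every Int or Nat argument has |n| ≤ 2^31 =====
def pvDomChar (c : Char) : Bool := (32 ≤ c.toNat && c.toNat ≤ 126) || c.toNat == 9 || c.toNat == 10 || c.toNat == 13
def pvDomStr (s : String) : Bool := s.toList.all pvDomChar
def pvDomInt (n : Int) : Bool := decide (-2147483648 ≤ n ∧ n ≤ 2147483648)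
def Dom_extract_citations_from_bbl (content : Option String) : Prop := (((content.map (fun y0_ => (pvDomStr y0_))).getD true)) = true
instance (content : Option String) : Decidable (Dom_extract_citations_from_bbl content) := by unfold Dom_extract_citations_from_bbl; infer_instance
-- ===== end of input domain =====

-- B replaces A's in_citation/accumulator state machine with a two-phase scan: skip the
-- preamble, then repeatedly cut the block running to the next \bibitem line (objective: simpler).

-- "\\bibitem" in line
def pvBibP (line : String) : Bool := PySem.Str.isIn "\\bibitem" line

-- ===== PORT A =====
-- one loop iteration over state (citations, in_citation, citation)
def pvAStep (st : List String × Bool × List String) (line : String) :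
    List String × Bool × List String :=
  let (cits, inC, cit) := st
  let (cits, inC, cit) :=
    if pvBibP line then
      (if cit ≠ [] then cits ++ [PySem.Str.join "\n" cit] else cits, true, ([] : List String))
    else (cits, inC, cit)
  if inC then (cits, inC, cit ++ [line]) else (cits, inC, cit)

-- final flush of the pending citation
def pvAFinish (st : List String × Bool × List String) : List String :=
  let (cits, _, cit) := st
  if cit ≠ [] then cits ++ [PySem.Str.join "\n" cit] else cits

def extract_citations_from_bbl (content : Option String) : List String :=
  match content with
  | none => []
  | some s =>
    if s = "" then []
    else pvAFinish ((PySem.Str.splitlines s).foldl pvAStep ([], false, []))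

-- ===== PORT B =====
-- outer while loop: the block is the head line plus the scan to the next \bibitem line
def pvBlocks : List String → List String
  | [] => []
  | l :: ls =>
    PySem.Str.join "\n" (l :: ls.takeWhile (fun x => !pvBibP x)) ::
      pvBlocks (ls.dropWhile (fun x => !pvBibP x))
termination_by ls => ls.length
decreasing_by
  simpa using Nat.lt_succ_of_le (List.length_dropWhile_le (fun x => !pvBibP x) ls)

def extract_citations_from_bbl_alt (content : Option String) : List String :=
  match content with
  | none => []
  | some s =>
    if s = "" then []
    else pvBlocks ((PySem.Str.splitlines s).dropWhile (fun x => !pvBibP x))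

-- ===== PRECONDITION & SPEC =====
def Spec_extract_citations_from_bbl (content : Option String) (out : List String) : Prop := out = extract_citations_from_bbl_alt content
instance (content : Option String) (out : List String) : Decidable (Spec_extract_citations_from_bbl content out) := by unfold Spec_extract_citations_from_bbl; infer_instance

-- ===== CLAIM (what is proved, stated in full; the proofs are below) =====
def Claim_equal_extract_citations_from_bbl : Prop := ∀ (content : Option String), Dom_extract_citations_from_bbl content → Spec_extract_citations_from_bbl content (extract_citations_from_bbl content)

-- ===== LEMMAS AND PROOFS =====

-- Once inside a citation (in_citation = true, pending block cur ≠ []), A finishes by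
-- emitting cur extended by the scan to the next \bibitem, then the remaining blocks.
lemma pvA_in_citation (ls : List String) : ∀ (cits cur : List String), cur ≠ [] →
    pvAFinish (ls.foldl pvAStep (cits, true, cur)) =
      cits ++ (PySem.Str.join "\n" (cur ++ ls.takeWhile (fun x => !pvBibP x)) ::
        pvBlocks (ls.dropWhile (fun x => !pvBibP x))) := by
  induction ls with
  | nil => intro cits cur h; simp [pvAFinish, pvBlocks, h]
  | cons l ls ih =>
    intro cits cur h
    by_cases hp : pvBibP l = true
    · simp only [List.foldl_cons]
      rw [show pvAStep (cits, true, cur) l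
          = (cits ++ [PySem.Str.join "\n" cur], true, [l]) by simp [pvAStep, hp, h]]
      rw [ih (cits ++ [PySem.Str.join "\n" cur]) [l] (by simp)]
      simp [hp, pvBlocks]
    · simp only [List.foldl_cons]
      rw [show pvAStep (cits, true, cur) l = (cits, true, cur ++ [l]) by
        simp [pvAStep, hp]]
      rw [ih cits (cur ++ [l]) (by simp)]
      simp [hp]

-- Before the first \bibitem line A carries the empty state; from the first \bibitem on
-- its result is exactly the block decomposition of the remaining lines.
lemma pvA_scan (ls : List String) :
    pvAFinish (ls.foldl pvAStep ([], false, [])) =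
      pvBlocks (ls.dropWhile (fun x => !pvBibP x)) := by
  induction ls with
  | nil => simp [pvAFinish, pvBlocks]
  | cons l ls ih =>
    by_cases hp : pvBibP l = true
    · simp only [List.foldl_cons]
      rw [show pvAStep ([], false, []) l = ([], true, [l]) by simp [pvAStep, hp]]
      rw [pvA_in_citation ls [] [l] (by simp)]
      simp [hp, pvBlocks]
    · simp only [List.foldl_cons]
      rw [show pvAStep ([], false, []) l = ([], false, []) by simp [pvAStep, hp]]
      simp [hp, ih]

-- ===== VERDICT (by name: the statement is the Claim_ definition above) =====
theorem extract_citations_from_bbl_spec : Claim_equal_extract_citations_from_bbl := by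
  intro content _
  unfold Spec_extract_citations_from_bbl
  match content with
  | none => rfl
  | some s =>
    simp only [extract_citations_from_bbl, extract_citations_from_bbl_alt]
    split
    · rfl
    · exact pvA_scan _
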